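-- pv_equiv track=rewrite | github.com/micheloosterhof/stethoscope | lib.py | split_by_doublet
-- ===== SOURCE A (Python) =====
-- from typing import Dict, List
--
-- def split_by_doublet(ciphertext: List[int]) -> List[List[int]]:
--     """
--     split in simple chunks separated by a doublet
--     """
--     output: List[List[int]] = []
--     current: List[int] = []
--     for i in range(0, len(ciphertext)):
--         if ciphertext[i] == ciphertext[i - 1]:
--             output.append(current)
--             current = [ciphertext[i]]
--         else:
--             current.append(ciphertext[i])
--     output.append(current)
--     return output
-- ===== SOURCE B (Python) =====
-- def split_by_doublet(ciphertext):
--     """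
--     split in simple chunks separated by a doublet
--     (two passes: collect cut indices, then slice between consecutive bounds)
--     """
--     cuts = [i for i in range(len(ciphertext)) if ciphertext[i] == ciphertext[i - 1]]
--     bounds = [0] + cuts + [len(ciphertext)]
--     return [ciphertext[s:e] for s, e in zip(bounds, bounds[1:])]
-- ===== Notes on version B (the rewrite author's own statement) =====
-- stated objective: alternative
-- what changed: Replaces A's single element-by-element loop carrying an output/current accumulator pair with two differently-shaped passes: first collect the cut indices i where ciphertext[i] == ciphertext[i-1] (keeping the i=0 wraparound comparison), then build the result by slicing between consecutive bounds [0]+cuts+[len].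
import Mathlib
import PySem

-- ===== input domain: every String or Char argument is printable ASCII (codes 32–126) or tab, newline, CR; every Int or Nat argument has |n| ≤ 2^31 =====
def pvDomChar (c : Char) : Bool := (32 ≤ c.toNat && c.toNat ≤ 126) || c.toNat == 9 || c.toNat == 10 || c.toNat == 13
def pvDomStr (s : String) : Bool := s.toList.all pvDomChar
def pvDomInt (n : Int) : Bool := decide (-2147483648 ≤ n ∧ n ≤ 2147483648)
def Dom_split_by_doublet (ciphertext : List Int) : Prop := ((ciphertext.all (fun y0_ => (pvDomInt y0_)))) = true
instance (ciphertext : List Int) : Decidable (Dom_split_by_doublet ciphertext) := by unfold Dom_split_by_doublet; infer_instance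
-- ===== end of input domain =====

-- B replaces A's element-by-element accumulator with two passes (collect cut indices, then
-- slice between consecutive bounds); objective: alternative decomposition, same behaviour.

-- ===== PORT A =====
-- one loop over indices; ciphertext[i] / ciphertext[i-1] are always in range here
-- (0 ≤ i < len, so i-1 ≥ -1 indexes from the back at i = 0), so pyGetD is exact.
def split_by_doublet (ciphertext : List Int) : List (List Int) :=
  let st := (PySem.List.pyRange 0 (ciphertext.length : Int) 1).foldl
    (fun (st : List (List Int) × List Int) i =>
      if PySem.List.pyGetD ciphertext i 0 == PySem.List.pyGetD ciphertext (i - 1) 0 then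
        (st.1 ++ [st.2], [PySem.List.pyGetD ciphertext i 0])
      else
        (st.1, st.2 ++ [PySem.List.pyGetD ciphertext i 0]))
    ([], [])
  st.1 ++ [st.2]

-- ===== PORT B =====
def split_by_doublet_alt (ciphertext : List Int) : List (List Int) :=
  let cuts := (PySem.List.pyRange 0 (ciphertext.length : Int) 1).filter
    (fun i => PySem.List.pyGetD ciphertext i 0 == PySem.List.pyGetD ciphertext (i - 1) 0)
  let bounds := 0 :: (cuts ++ [(ciphertext.length : Int)])
  (bounds.zip bounds.tail).map
    (fun p => PySem.List.slice ciphertext (some p.1) (some p.2))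

-- ===== PRECONDITION & SPEC =====
def Spec_split_by_doublet (ciphertext : List Int) (out : List (List Int)) : Prop := out = split_by_doublet_alt ciphertext
instance (ciphertext : List Int) (out : List (List Int)) : Decidable (Spec_split_by_doublet ciphertext out) := by unfold Spec_split_by_doublet; infer_instance

-- ===== CLAIM (what is proved, stated in full; the proofs are below) =====
def Claim_equal_split_by_doublet : Prop := ∀ (ciphertext : List Int), Dom_split_by_doublet ciphertext → Spec_split_by_doublet ciphertext (split_by_doublet ciphertext)

-- ===== LEMMAS AND PROOFS =====

-- the doublet test both ports share
def pvCond (xs : List Int) (i : Int) : Bool :=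
  PySem.List.pyGetD xs i 0 == PySem.List.pyGetD xs (i - 1) 0

-- recursive view of B's "slice between consecutive bounds"
def pvChunks (xs : List Int) : List Int → List (List Int)
  | a :: b :: rest => PySem.List.slice xs (some a) (some b) :: pvChunks xs (b :: rest)
  | _ => []

lemma pvChunks_eq_zip (xs : List Int) (bs : List Int) :
    (bs.zip bs.tail).map (fun p => PySem.List.slice xs (some p.1) (some p.2)) = pvChunks xs bs := by
  match bs with
  | [] => rfl
  | [a] => rfl
  | a :: b :: rest =>
    simp [pvChunks, List.zip, ← pvChunks_eq_zip xs (b :: rest)]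

lemma pv_slice_snoc (xs : List Int) (s i : Nat) (hs : s ≤ i) (hi : i < xs.length) :
    PySem.List.slice xs (some (s : Int)) (some (i : Int)) ++ [xs[i]] =
    PySem.List.slice xs (some (s : Int)) (some ((i : Int) + 1)) := by
  have h1 : ((i : Int) + 1) = ((i + 1 : Nat) : Int) := by push_cast; ring
  rw [h1, PySem.List.slice_natCast, PySem.List.slice_natCast]
  have hgd : xs[i] = (xs.drop s)[i - s]'(by simpa [List.length_drop] using by omega) := by
    simp [List.getElem_drop, Nat.add_sub_cancel' hs]
  rw [hgd, show i + 1 - s = (i - s) + 1 from by omega]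
  exact List.take_append_getElem (by simp [List.length_drop]; omega)

lemma pv_slice_single (xs : List Int) (i : Nat) (hi : i < xs.length) :
    [PySem.List.pyGetD xs (i : Int) 0] = PySem.List.slice xs (some (i : Int)) (some ((i : Int) + 1)) := by
  have h1 : ((i : Int) + 1) = ((i + 1 : Nat) : Int) := by push_cast; ring
  rw [h1, PySem.List.slice_natCast]
  have : i + 1 - i = 1 := by omega
  rw [this]
  rw [List.take_one]
  simp [PySem.List.pyGetD_natCast, List.getD, List.head?_drop, List.getElem?_eq_getElem hi]

-- loop invariant: from index i with current = xs[s:i], A's remaining loop produces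
-- exactly B's slices between the remaining cut indices
lemma pv_main (xs : List Int) (k : Nat) : ∀ (i s : Nat) (out : List (List Int)),
    k = xs.length - i → s ≤ i → i ≤ xs.length →
    (((PySem.List.pyRange (i : Int) (xs.length : Int) 1).foldl
        (fun (st : List (List Int) × List Int) j =>
          if pvCond xs j then (st.1 ++ [st.2], [PySem.List.pyGetD xs j 0])
          else (st.1, st.2 ++ [PySem.List.pyGetD xs j 0]))
        (out, PySem.List.slice xs (some (s : Int)) (some (i : Int)))).1 ++
      [((PySem.List.pyRange (i : Int) (xs.length : Int) 1).foldl
        (fun (st : List (List Int) × List Int) j =>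
          if pvCond xs j then (st.1 ++ [st.2], [PySem.List.pyGetD xs j 0])
          else (st.1, st.2 ++ [PySem.List.pyGetD xs j 0]))
        (out, PySem.List.slice xs (some (s : Int)) (some (i : Int)))).2]) =
    out ++ pvChunks xs ((s : Int) ::
      ((PySem.List.pyRange (i : Int) (xs.length : Int) 1).filter (pvCond xs) ++ [(xs.length : Int)])) := by
  induction k with
  | zero =>
    intro i s out hk hs hi
    have hie : i = xs.length := by omega
    subst hie
    simp [PySem.List.pyRange_one_eq_nil (le_refl _), pvChunks]
  | succ k ih =>
    intro i s out hk hs hi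
    have hlt : i < xs.length := by omega
    have hcons := PySem.List.pyRange_one_cons (a := (i : Int)) (b := (xs.length : Int))
      (by exact_mod_cast hlt)
    have hstep : ((i : Int) + 1) = ((i + 1 : Nat) : Int) := by push_cast; ring
    rw [hcons]
    by_cases hc : pvCond xs (i : Int)
    · -- doublet: flush current, start a new chunk at i
      simp only [List.foldl_cons, List.filter_cons, hc, if_true]
      rw [pv_slice_single xs i hlt, hstep]
      rw [ih (i + 1) i (out ++ [PySem.List.slice xs (some (s : Int)) (some (i : Int))])
        (by omega) (by omega) (by omega)]
      simp [pvChunks]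
    · simp only [List.foldl_cons, List.filter_cons, hc, if_false, Bool.false_eq_true]
      have hget : PySem.List.pyGetD xs (i : Int) 0 = xs[i] := by
        simp [PySem.List.pyGetD_natCast, List.getD, List.getElem?_eq_getElem hlt]
      rw [hget, pv_slice_snoc xs s i hs hlt, hstep]
      simp only [Bool.not_eq_true] at hc
      exact ih (i + 1) s out (by omega) (by omega) (by omega)

-- ===== VERDICT (by name: the statement is the Claim_ definition above) =====
theorem split_by_doublet_spec : Claim_equal_split_by_doublet := by
  intro xs _
  unfold Spec_split_by_doublet split_by_doublet split_by_doublet_alt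
  dsimp only
  rw [pvChunks_eq_zip]
  have h0 : PySem.List.slice xs (some ((0 : Nat) : Int)) (some ((0 : Nat) : Int)) = [] := by
    rw [PySem.List.slice_natCast]; simp
  have := pv_main xs xs.length 0 0 [] (by omega) (le_refl 0) (Nat.zero_le _)
  simp only [Nat.cast_zero] at this h0
  rw [h0] at this
  exact this
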